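-- pv_equiv track=rewrite | github.com/astrovsky01/genome-deduplication | code/dedup2.py | condense_masked_regions
-- ===== SOURCE A (Python) =====
-- def condense_masked_regions(masked, k=32):
--     masked_regions = []
--     if len(masked) == 0:
--         return masked_regions
--     region_start = masked[0]
--     for i in range(len(masked)-1):
--         # If the next masked kmer is contiguous with the current one
--         if masked[i] + 1 != masked[i+1]:
--             masked_regions.append((region_start, masked[i] + k))
--             region_start = masked[i+1]
--     masked_regions.append((region_start, masked[-1] + k))
--     return masked_regions
-- ===== SOURCE B (Python) =====
-- def condense_masked_regions(masked, k=32):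
--     # Build the regions back-to-front: scan from the right, either extend the
--     # most recently created region (when contiguous) or open a new one.
--     out = []
--     for x in reversed(masked):
--         if out and out[-1][0] == x + 1:
--             out[-1] = (x, out[-1][1])
--         else:
--             out.append((x, x + k))
--     out.reverse()
--     return out
-- ===== Notes on version B (the rewrite author's own statement) =====
-- stated objective: alternative
-- what changed: Replaces A's left-to-right index loop carrying region_start (appending a region at each contiguity break) by a right-to-left scan that builds the regions back-to-front, either extending the most recently opened region or opening a new one.
import Mathlib
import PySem

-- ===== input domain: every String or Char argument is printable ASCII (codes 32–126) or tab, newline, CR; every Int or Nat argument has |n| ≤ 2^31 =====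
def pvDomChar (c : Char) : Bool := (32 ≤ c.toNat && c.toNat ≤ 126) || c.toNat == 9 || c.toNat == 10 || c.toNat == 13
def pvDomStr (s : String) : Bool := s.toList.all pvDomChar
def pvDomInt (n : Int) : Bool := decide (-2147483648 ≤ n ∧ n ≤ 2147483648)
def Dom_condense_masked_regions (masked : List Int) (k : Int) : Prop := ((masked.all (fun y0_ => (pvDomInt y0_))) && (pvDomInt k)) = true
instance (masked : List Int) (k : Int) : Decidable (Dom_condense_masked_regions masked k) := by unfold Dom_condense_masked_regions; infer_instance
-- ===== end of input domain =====

-- B builds the regions back-to-front (right scan merging into the front region)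
-- instead of A's left-to-right loop carrying region_start; objective: alternative decomposition.

-- ===== PORT A =====
-- A's for-loop over i in range(len(masked)-1): structural recursion carrying the
-- previous element (masked[i]), region_start and the accumulated list.
def pvALoop (k prev : Int) (rest : List Int) (region_start : Int)
    (acc : List (Int × Int)) : List (Int × Int) :=
  match rest with
  | [] => acc ++ [(region_start, prev + k)]      -- final append with masked[-1] + k
  | x :: xs =>
    if prev + 1 ≠ x then
      pvALoop k x xs x (acc ++ [(region_start, prev + k)])
    else
      pvALoop k x xs region_start acc

def condense_masked_regions (masked : List Int) (k : Int) : List (Int × Int) :=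
  match masked with
  | [] => []                                     -- len(masked) == 0
  | m :: rest => pvALoop k m rest m []           -- region_start = masked[0]

-- ===== PORT B =====
-- one step of B's loop body: merge x into the front region if contiguous, else open one
-- (the Python appends at the back of a reversed buffer and reverses at the end;
--  the fold here conses onto the front, producing the same list)
def pvBStep (k x : Int) (out : List (Int × Int)) : List (Int × Int) :=
  match out with
  | (s, e) :: rs => if s = x + 1 then (x, e) :: rs else (x, x + k) :: (s, e) :: rs
  | [] => [(x, x + k)]

def condense_masked_regions_alt (masked : List Int) (k : Int) : List (Int × Int) :=
  masked.foldr (pvBStep k) []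

-- ===== PRECONDITION & SPEC =====
def Spec_condense_masked_regions (masked : List Int) (k : Int) (out : List (Int × Int)) : Prop := out = condense_masked_regions_alt masked k
instance (masked : List Int) (k : Int) (out : List (Int × Int)) : Decidable (Spec_condense_masked_regions masked k out) := by unfold Spec_condense_masked_regions; infer_instance

-- ===== CLAIM (what is proved, stated in full; the proofs are below) =====
def Claim_equal_condense_masked_regions : Prop := ∀ (masked : List Int) (k : Int), Dom_condense_masked_regions masked k → Spec_condense_masked_regions masked k (condense_masked_regions masked k)

-- ===== LEMMAS AND PROOFS =====

-- the first region produced by B on a nonempty list starts at the first element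
theorem pvB_head (k x : Int) (xs : List Int) :
    ∃ e t, List.foldr (pvBStep k) [] (x :: xs) = (x, e) :: t := by
  cases h : List.foldr (pvBStep k) [] xs with
  | nil => exact ⟨x + k, [], by simp [List.foldr, h, pvBStep]⟩
  | cons p rs =>
    obtain ⟨s, e⟩ := p
    by_cases hs : s = x + 1
    · exact ⟨e, rs, by simp [List.foldr, h, pvBStep, hs]⟩
    · exact ⟨x + k, (s, e) :: rs, by simp [List.foldr, h, pvBStep, hs]⟩

-- replace the start of the first region
def pvSetFirst (rs : Int) : List (Int × Int) → List (Int × Int)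
  | (_, e) :: t => (rs, e) :: t
  | [] => []

-- loop invariant relating A's loop state to B's fold on the remaining suffix
theorem pvLoop_eq (k : Int) (rest : List Int) :
    ∀ prev rs acc, pvALoop k prev rest rs acc
      = acc ++ pvSetFirst rs (List.foldr (pvBStep k) [] (prev :: rest)) := by
  induction rest with
  | nil => intro prev rs acc; simp [pvALoop, List.foldr, pvBStep, pvSetFirst]
  | cons x xs ih =>
    intro prev rs acc
    obtain ⟨e, t, hB⟩ := pvB_head k x xs
    by_cases hc : prev + 1 = x
    · have : pvALoop k prev (x :: xs) rs acc = pvALoop k x xs rs acc := by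
        simp [pvALoop, hc]
      rw [this, ih]
      simp [List.foldr] at hB ⊢
      rw [hB]
      simp [pvBStep, hc.symm, pvSetFirst]
    · have : pvALoop k prev (x :: xs) rs acc
          = pvALoop k x xs x (acc ++ [(rs, prev + k)]) := by
        simp [pvALoop, hc]
      rw [this, ih]
      simp [List.foldr] at hB ⊢
      rw [hB]
      have hx : ¬ x = prev + 1 := by omega
      simp [pvBStep, hx, pvSetFirst]

-- ===== VERDICT (by name: the statement is the Claim_ definition above) =====
theorem condense_masked_regions_spec : Claim_equal_condense_masked_regions := by
  intro masked k _
  unfold Spec_condense_masked_regions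
  cases masked with
  | nil => simp [condense_masked_regions, condense_masked_regions_alt]
  | cons m rest =>
    obtain ⟨e, t, hB⟩ := pvB_head k m rest
    simp [condense_masked_regions, condense_masked_regions_alt, pvLoop_eq, hB, pvSetFirst]
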